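-- pv_equiv track=rewrite | github.com/WinnieeO/TRANTHIPHUONGQUYNH_MON_CTDL | Buoi_4/Chuong_6/bai13_c6.py | generate_lucky_numbers
-- ===== SOURCE A (Python) =====
-- def generate_lucky_numbers(n):
--     # Tạo ra tất cả các số lộc phát có không quá n chữ số.
--     lucky_numbers = []
--
--     # Tạo số từ 1 đến n chữ số
--     for length in range(1, n + 1):
--         # Sử dụng phép sinh nhị phân để tạo các tổ hợp
--         for i in range(2 ** length):
--             number = ''
--             for j in range(length):
--                 if (i >> j) & 1:
--                     number = '8' + number  # Thêm 8 vào đầu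
--                 else:
--                     number = '6' + number  # Thêm 6 vào đầu
--             lucky_numbers.append(number)
--
--     return lucky_numbers
-- ===== SOURCE B (Python) =====
-- def generate_lucky_numbers(n):
--     # Level-by-level: extend every string of the previous length by '6' then '8'.
--     lucky_numbers = []
--     prev = ['']
--     for _ in range(n):
--         cur = []
--         for s in prev:
--             for c in '68':
--                 t = s + c
--                 lucky_numbers.append(t)
--                 cur.append(t)
--         prev = cur
--     return lucky_numbers
-- ===== Notes on version B (the rewrite author's own statement) =====
-- stated objective: alternative
-- what changed: Instead of decoding the bits of a counter 0..2^length-1 into a string for every length, B keeps the previous length's level and extends each string by '6' then '8', producing the same lexicographic order with no counter and no per-string bit loop.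
import Mathlib
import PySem

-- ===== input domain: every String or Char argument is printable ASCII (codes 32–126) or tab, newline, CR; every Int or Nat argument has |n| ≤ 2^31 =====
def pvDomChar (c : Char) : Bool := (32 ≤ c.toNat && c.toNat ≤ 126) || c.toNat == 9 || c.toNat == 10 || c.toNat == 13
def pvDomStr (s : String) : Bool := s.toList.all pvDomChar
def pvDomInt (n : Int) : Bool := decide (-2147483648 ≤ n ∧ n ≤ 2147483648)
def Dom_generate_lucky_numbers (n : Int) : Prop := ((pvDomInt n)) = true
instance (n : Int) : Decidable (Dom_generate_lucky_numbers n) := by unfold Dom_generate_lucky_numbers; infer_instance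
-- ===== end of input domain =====

-- B builds each length's strings by extending the previous level by '6' then '8'
-- (no per-string bit decoding), same output without any bit manipulation.

-- ===== PORT A =====
-- In A's loops length ≥ 1 and i, j ≥ 0, so `2 ** length` is `2 ^ length.toNat`
-- and `(i >> j) & 1` is the Nat computation `(i.toNat >>> j.toNat) &&& 1` — exact there.
def generate_lucky_numbers (n : Int) : List String :=
  (PySem.List.pyRange 1 (n + 1) 1).foldl (fun lucky_numbers length =>
    (PySem.List.pyRange 0 ((2 : Int) ^ length.toNat) 1).foldl (fun lucky2 i =>
      let number : String :=
        (PySem.List.pyRange 0 length 1).foldl (fun number j =>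
          if (i.toNat >>> j.toNat) &&& 1 = 1 then "8" ++ number else "6" ++ number) ""
      lucky2 ++ [number]) lucky_numbers) []

-- ===== PORT B =====
-- state = (lucky_numbers, prev); each pass over prev appends s+'6' then s+'8' to both
-- the output and the new level (cur starts empty each length).
def generate_lucky_numbers_alt (n : Int) : List String :=
  ((PySem.List.pyRange 0 n 1).foldl (fun (st : List String × List String) _ =>
      st.2.foldl (fun st2 s =>
        (["6", "8"] : List String).foldl (fun st3 c =>
          (st3.1 ++ [s ++ c], st3.2 ++ [s ++ c])) st2) (st.1, ([] : List String)))
    (([] : List String), ([""] : List String))).1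

-- ===== PRECONDITION & SPEC =====
def Spec_generate_lucky_numbers (n : Int) (out : List String) : Prop := out = generate_lucky_numbers_alt n
instance (n : Int) (out : List String) : Decidable (Spec_generate_lucky_numbers n out) := by unfold Spec_generate_lucky_numbers; infer_instance

-- ===== CLAIM (what is proved, stated in full; the proofs are below) =====
def Claim_equal_generate_lucky_numbers : Prop := ∀ (n : Int), Dom_generate_lucky_numbers n → Spec_generate_lucky_numbers n (generate_lucky_numbers n)

-- ===== LEMMAS AND PROOFS =====

-- append '6' and '8' to every string of a level, in order
def pvExpand (xs : List String) : List String := xs.flatMap (fun s => [s ++ "6", s ++ "8"])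

-- B's levels
def pvLvl : Nat → List String
  | 0 => [""]
  | L + 1 => pvExpand (pvLvl L)

-- the accumulated output after the first m lengths
def pvAcc : Nat → List String
  | 0 => []
  | m + 1 => pvAcc m ++ pvLvl (m + 1)

-- A's inner string builder, on Nats
def pvNum (i L : Nat) : String :=
  (List.range L).foldl (fun number j =>
    if (i >>> j) &&& 1 = 1 then "8" ++ number else "6" ++ number) ""

lemma pvNum_succ (i L : Nat) :
    pvNum i (L + 1) = (if (i >>> L) &&& 1 = 1 then "8" else "6") ++ pvNum i L := by
  simp only [pvNum, List.range_succ, List.foldl_append, List.foldl_cons, List.foldl_nil]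
  split <;> rfl

lemma pvBit_low (k L j : Nat) (hj : j < L) :
    ((2 ^ L + k) >>> j) &&& 1 = (k >>> j) &&& 1 := by
  simp only [Nat.shiftRight_eq_div_pow, Nat.and_one_is_mod]
  have h : 2 ^ L = 2 ^ j * (2 * 2 ^ (L - j - 1)) := by
    rw [← pow_succ', ← pow_add]
    congr 1
    omega
  rw [h, Nat.add_comm, Nat.add_mul_div_left _ _ (Nat.two_pow_pos j),
    Nat.add_mul_mod_self_left]

lemma pvNum_add_pow (k L : Nat) :
    pvNum (2 ^ L + k) L = pvNum k L := by
  simp only [pvNum]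
  apply PySem.List.foldl_congr_mem
  intro s j hj
  rw [pvBit_low k L j (List.mem_range.mp hj)]

lemma pvBit_top_low (k L : Nat) (hk : k < 2 ^ L) : (k >>> L) &&& 1 = 0 := by
  simp [Nat.shiftRight_eq_div_pow, Nat.div_eq_of_lt hk]

lemma pvBit_top_high (k L : Nat) (hk : k < 2 ^ L) : ((2 ^ L + k) >>> L) &&& 1 = 1 := by
  simp only [Nat.shiftRight_eq_div_pow, Nat.and_one_is_mod]
  have h : (2 ^ L + k) / 2 ^ L = 1 := by
    rw [Nat.add_comm, Nat.add_div_right _ (Nat.two_pow_pos L), Nat.div_eq_of_lt hk]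
  rw [h]

lemma pvExpand_append (xs ys : List String) :
    pvExpand (xs ++ ys) = pvExpand xs ++ pvExpand ys := by
  simp [pvExpand]

lemma pvExpand_map_append (c : String) (xs : List String) :
    pvExpand (xs.map (c ++ ·)) = (pvExpand xs).map (c ++ ·) := by
  simp [pvExpand, List.flatMap_map, List.map_flatMap, String.append_assoc]

-- the two level recursions agree: expanding at the back = splitting on the front char
lemma pvExpand_lvl (L : Nat) :
    pvExpand (pvLvl L) = (pvLvl L).map ("6" ++ ·) ++ (pvLvl L).map ("8" ++ ·) := by
  induction L with
  | zero => simp [pvLvl, pvExpand, String.empty_append, String.append_empty]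
  | succ L ih =>
    have h : pvLvl (L + 1) = pvExpand (pvLvl L) := rfl
    rw [h, ih, pvExpand_append, pvExpand_map_append, pvExpand_map_append, ih]

lemma pvLvl_succ_front (L : Nat) :
    pvLvl (L + 1) = (pvLvl L).map ("6" ++ ·) ++ (pvLvl L).map ("8" ++ ·) := by
  have h : pvLvl (L + 1) = pvExpand (pvLvl L) := rfl
  rw [h, pvExpand_lvl]

-- A's level = B's level
lemma pvLevel_eq (L : Nat) :
    (List.range (2 ^ L)).map (fun k => pvNum k L) = pvLvl L := by
  induction L with
  | zero => simp [pvNum, pvLvl]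
  | succ L ih =>
    have hsplit : List.range (2 ^ (L + 1)) =
        List.range (2 ^ L) ++ (List.range (2 ^ L)).map (2 ^ L + ·) := by
      rw [← List.range_add, ← two_mul, ← pow_succ']
    rw [hsplit, List.map_append, List.map_map, pvLvl_succ_front]
    congr 1
    · rw [← ih, List.map_map]
      apply List.map_congr_left
      intro k hk
      simp only [Function.comp_apply]
      rw [pvNum_succ, pvBit_top_low k L (List.mem_range.mp hk)]
      simp
    · rw [← ih, List.map_map]
      apply List.map_congr_left
      intro k hk
      simp only [Function.comp_apply]
      rw [pvNum_succ, pvBit_top_high k L (List.mem_range.mp hk), pvNum_add_pow]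
      simp

-- ---- A's port equals pvAcc ----

lemma pvA_inner (L : Nat) (lucky : List String) :
    (PySem.List.pyRange 0 ((2 : Int) ^ ((L : Int)).toNat) 1).foldl (fun lucky2 i =>
      let number : String :=
        (PySem.List.pyRange 0 (L : Int) 1).foldl (fun number j =>
          if (i.toNat >>> j.toNat) &&& 1 = 1 then "8" ++ number else "6" ++ number) ""
      lucky2 ++ [number]) lucky = lucky ++ pvLvl L := by
  have h2 : ((2 : Int) ^ ((L : Int)).toNat) = ((2 ^ L : Nat) : Int) := by
    push_cast; rfl
  rw [h2, PySem.List.pyRange_zero_nat (2 ^ L), List.foldl_map,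
    PySem.List.foldl_append_singleton_eq_map]
  congr 1
  rw [← pvLevel_eq]
  apply List.map_congr_left
  intro k _
  rw [PySem.List.pyRange_zero_nat L, List.foldl_map]
  simp only [Int.toNat_natCast]
  rfl

lemma pvA_nat (m : Nat) :
    (PySem.List.pyRange 1 ((m : Int) + 1) 1).foldl (fun lucky_numbers length =>
      (PySem.List.pyRange 0 ((2 : Int) ^ length.toNat) 1).foldl (fun lucky2 i =>
        let number : String :=
          (PySem.List.pyRange 0 length 1).foldl (fun number j =>
            if (i.toNat >>> j.toNat) &&& 1 = 1 then "8" ++ number else "6" ++ number) ""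
        lucky2 ++ [number]) lucky_numbers) [] = pvAcc m := by
  induction m with
  | zero =>
    rw [PySem.List.pyRange_one_eq_nil (by norm_num)]
    rfl
  | succ m ih =>
    have h1 : ((m + 1 : Nat) : Int) + 1 = ((m : Int) + 1) + 1 := by push_cast; ring
    rw [h1, PySem.List.pyRange_one_succ_right (by omega), List.foldl_append, ih]
    simp only [List.foldl_cons, List.foldl_nil]
    have h2 : (m : Int) + 1 = ((m + 1 : Nat) : Int) := by push_cast; ring
    rw [h2, pvA_inner (m + 1) (pvAcc m)]
    rfl

lemma pvA_eq (n : Int) : generate_lucky_numbers n = pvAcc n.toNat := by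
  unfold generate_lucky_numbers
  by_cases h : n ≤ 0
  · rw [PySem.List.pyRange_one_eq_nil (by omega)]
    have h0 : n.toNat = 0 := by omega
    rw [h0]; rfl
  · have h0 : n = (n.toNat : Int) := by omega
    rw [h0]
    exact pvA_nat n.toNat

-- ---- B's port equals pvAcc ----

lemma pvB_inner (prev out cur : List String) :
    prev.foldl (fun st2 s =>
      (st2.1 ++ [s ++ "6"] ++ [s ++ "8"], st2.2 ++ [s ++ "6"] ++ [s ++ "8"])) (out, cur)
      = (out ++ pvExpand prev, cur ++ pvExpand prev) := by
  induction prev generalizing out cur with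
  | nil => simp [pvExpand]
  | cons s rest ih =>
    simp only [List.foldl_cons]
    rw [ih]
    simp [pvExpand, List.append_assoc]

lemma pvB_nat (m : Nat) :
    (PySem.List.pyRange 0 (m : Int) 1).foldl (fun (st : List String × List String) _ =>
      st.2.foldl (fun st2 s =>
        (["6", "8"] : List String).foldl (fun st3 c =>
          (st3.1 ++ [s ++ c], st3.2 ++ [s ++ c])) st2) (st.1, ([] : List String)))
      (([] : List String), ([""] : List String)) = (pvAcc m, pvLvl m) := by
  induction m with
  | zero =>
    rw [PySem.List.pyRange_one_eq_nil (by norm_num)]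
    rfl
  | succ m ih =>
    have h1 : ((m + 1 : Nat) : Int) = (m : Int) + 1 := by push_cast; ring
    rw [h1, PySem.List.pyRange_one_succ_right (by omega), List.foldl_append, ih]
    simp only [List.foldl_cons, List.foldl_nil]
    rw [pvB_inner]
    simp [pvAcc, pvLvl]

lemma pvB_eq (n : Int) : generate_lucky_numbers_alt n = pvAcc n.toNat := by
  unfold generate_lucky_numbers_alt
  by_cases h : n ≤ 0
  · rw [PySem.List.pyRange_one_eq_nil (by omega)]
    have h0 : n.toNat = 0 := by omega
    rw [h0]; rfl
  · have h0 : n = (n.toNat : Int) := by omega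
    rw [h0, pvB_nat n.toNat]
    conv_rhs => rw [← h0]

-- ===== VERDICT (by name: the statement is the Claim_ definition above) =====
theorem generate_lucky_numbers_spec : Claim_equal_generate_lucky_numbers := by
  intro n _
  unfold Spec_generate_lucky_numbers
  rw [pvA_eq, pvB_eq]
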